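-- pv_equiv track=rewrite | github.com/u-shrestha/nn-gpt | ab/gpt/util/nneval_worker_pool.py | _expand_gpu_assignments
-- ===== SOURCE A (Python) =====
-- from typing import Any, Dict, List, Optional, Sequence, Tuple
--
-- def _expand_gpu_assignments(
--     visible_gpu_tokens: Sequence[str],
--     per_gpu_worker_counts: Sequence[int],
-- ) -> Tuple[List[int], List[str]]:
--     assigned_indices: List[int] = []
--     assigned_tokens: List[str] = []
--     active_device_indices = [
--         int(device_index)
--         for device_index, worker_count in enumerate(per_gpu_worker_counts)
--         if int(worker_count) > 0
--     ]
--     max_workers = max([int(count) for count in per_gpu_worker_counts] or [0])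
--     for round_index in range(max_workers):
--         for device_index in active_device_indices:
--             worker_count = int(per_gpu_worker_counts[device_index])
--             if round_index >= worker_count:
--                 continue
--             assigned_indices.append(int(device_index))
--             assigned_tokens.append(str(visible_gpu_tokens[device_index]))
--     return assigned_indices, assigned_tokens
-- ===== SOURCE B (Python) =====
-- def _expand_gpu_assignments(visible_gpu_tokens, per_gpu_worker_counts):
--     # Rounds between consecutive distinct remaining worker counts all emit the
--     # same block of still-active devices, so emit each block once per level and
--     # repeat it with list multiplication, dropping exhausted devices per level.
--     remaining = [(int(i), int(c)) for i, c in enumerate(per_gpu_worker_counts) if int(c) > 0]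
--     assigned_indices = []
--     assigned_tokens = []
--     rounds_done = 0
--     while remaining:
--         level = min(c for _, c in remaining)
--         block_indices = [d for d, _ in remaining]
--         block_tokens = [str(visible_gpu_tokens[d]) for d, _ in remaining]
--         reps = level - rounds_done
--         assigned_indices += block_indices * reps
--         assigned_tokens += block_tokens * reps
--         remaining = [(d, c) for d, c in remaining if c > level]
--         rounds_done = level
--     return assigned_indices, assigned_tokens
-- ===== Notes on version B (the rewrite author's own statement) =====
-- stated objective: faster
-- what changed: B replaces A's fixed double loop over range(max_workers) x all initially-active devices (with a per-cell count lookup and skip test) by a level-by-level worklist: all rounds between consecutive distinct remaining worker counts emit the same block of still-active devices, so B emits each block once per level via list multiplication and then drops the exhausted devices, never revisiting them.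
import Mathlib
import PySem

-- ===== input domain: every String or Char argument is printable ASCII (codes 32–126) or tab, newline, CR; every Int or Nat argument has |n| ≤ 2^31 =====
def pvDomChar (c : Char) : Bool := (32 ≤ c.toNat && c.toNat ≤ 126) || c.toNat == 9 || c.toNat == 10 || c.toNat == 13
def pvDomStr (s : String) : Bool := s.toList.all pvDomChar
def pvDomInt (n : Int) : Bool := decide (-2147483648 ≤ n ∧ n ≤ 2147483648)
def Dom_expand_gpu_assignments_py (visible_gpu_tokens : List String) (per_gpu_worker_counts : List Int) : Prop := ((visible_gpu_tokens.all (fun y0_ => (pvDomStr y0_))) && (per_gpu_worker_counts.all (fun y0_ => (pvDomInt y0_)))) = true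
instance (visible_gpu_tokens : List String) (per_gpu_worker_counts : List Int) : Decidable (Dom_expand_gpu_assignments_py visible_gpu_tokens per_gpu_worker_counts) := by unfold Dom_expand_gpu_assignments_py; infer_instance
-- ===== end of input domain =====

-- B replaces A's max_workers × all-devices double scan by a level-by-level worklist
-- that emits each constant block of still-active devices once per distinct remaining
-- count (repeated by list multiplication) and drops exhausted devices (measured faster).


-- ===== PORT A =====
def expand_gpu_assignments_py (visible_gpu_tokens : List String) (per_gpu_worker_counts : List Int) : List Int × List String :=
  let active_device_indices : List Int :=
    ((PySem.List.enumerate per_gpu_worker_counts).filter (fun p => decide (0 < p.2))).map (fun p => p.1)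
  let max_workers : Int :=
    (PySem.List.max? (if per_gpu_worker_counts = [] then ([0] : List Int) else per_gpu_worker_counts) (fun x => x)).getD 0
  (PySem.List.pyRange 0 max_workers 1).foldl
    (fun acc round_index =>
      active_device_indices.foldl
        (fun acc device_index =>
          let worker_count := PySem.List.pyGetD per_gpu_worker_counts device_index 0
          if worker_count ≤ round_index then acc
          else (acc.1 ++ [device_index],
                acc.2 ++ [PySem.List.pyGetD visible_gpu_tokens device_index ""]))
        acc)
    ([], [])

-- ===== PORT B =====
-- one while-loop body of Source B, transcribed; the fuel argument is only a termination
-- device (each level drops at least one device, so the worklist length is enough fuel)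
def pvAltGo (toks : List String) : Nat → Int → List (Int × Int) → List Int × List String
  | _, _, [] => ([], [])
  | 0, _, _ :: _ => ([], [])
  | fuel + 1, rounds_done, p :: t =>
    let level := t.foldl (fun m q => min m q.2) p.2
    let block_indices := (p :: t).map (fun q => q.1)
    let block_tokens := (p :: t).map (fun q => PySem.List.pyGetD toks q.1 "")
    let reps := (level - rounds_done).toNat
    let rest := pvAltGo toks fuel level ((p :: t).filter (fun q => decide (level < q.2)))
    ((List.replicate reps block_indices).flatten ++ rest.1,
     (List.replicate reps block_tokens).flatten ++ rest.2)

def expand_gpu_assignments_py_alt (visible_gpu_tokens : List String) (per_gpu_worker_counts : List Int) : List Int × List String :=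
  let remaining := (PySem.List.enumerate per_gpu_worker_counts).filter (fun p => decide (0 < p.2))
  pvAltGo visible_gpu_tokens remaining.length 0 remaining


-- ===== PRECONDITION & SPEC =====
-- Pre_ excludes exactly the inputs where Python A raises IndexError: a device with a
-- positive worker count but no corresponding entry in visible_gpu_tokens.
def Pre_expand_gpu_assignments_py (visible_gpu_tokens : List String) (per_gpu_worker_counts : List Int) : Prop :=
  ∀ p ∈ PySem.List.enumerate per_gpu_worker_counts, 0 < p.2 → p.1 < (visible_gpu_tokens.length : Int)
instance (visible_gpu_tokens : List String) (per_gpu_worker_counts : List Int) : Decidable (Pre_expand_gpu_assignments_py visible_gpu_tokens per_gpu_worker_counts) := by unfold Pre_expand_gpu_assignments_py; infer_instance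

def pvWitness_expand_gpu_assignments_py : List String × List Int := (["a", "b"], [2, 1])

def Spec_expand_gpu_assignments_py (visible_gpu_tokens : List String) (per_gpu_worker_counts : List Int) (out : List Int × List String) : Prop := out = expand_gpu_assignments_py_alt visible_gpu_tokens per_gpu_worker_counts
instance (visible_gpu_tokens : List String) (per_gpu_worker_counts : List Int) (out : List Int × List String) : Decidable (Spec_expand_gpu_assignments_py visible_gpu_tokens per_gpu_worker_counts out) := by unfold Spec_expand_gpu_assignments_py; infer_instance

-- ===== CLAIM (what is proved, stated in full; the proofs are below) =====
def Claim_equal_expand_gpu_assignments_py : Prop := ∀ (visible_gpu_tokens : List String) (per_gpu_worker_counts : List Int), Dom_expand_gpu_assignments_py visible_gpu_tokens per_gpu_worker_counts → Pre_expand_gpu_assignments_py visible_gpu_tokens per_gpu_worker_counts → Spec_expand_gpu_assignments_py visible_gpu_tokens per_gpu_worker_counts (expand_gpu_assignments_py visible_gpu_tokens per_gpu_worker_counts)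

-- ===== LEMMAS AND PROOFS =====
-- the emitted row of round r: the devices still having more than r workers
def pvRow {α : Type} (g : Int → α) (P : List (Int × Int)) (r : Int) : List α :=
  (P.filter (fun p => decide (r < p.2))).map (fun p => g p.1)

-- at a round at or past the level, dropping the exhausted devices does not change the row
theorem pvRow_filter {α : Type} (g : Int → α) (P : List (Int × Int)) (level r : Int) (h : level ≤ r) :
    pvRow g (P.filter (fun q => decide (level < q.2))) r = pvRow g P r := by
  unfold pvRow
  rw [List.filter_filter]
  congr 1
  refine List.filter_congr ?_
  intro p _
  rw [← Bool.decide_and]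
  exact decide_eq_decide.mpr (by omega)

-- a run of rounds all below every remaining count emits the same full block each round
theorem pvRow_const_block {α : Type} (g : Int → α) (P : List (Int × Int)) :
    ∀ (n : Nat) (a b : Int), (b - a).toNat = n → (∀ q ∈ P, b ≤ q.2) →
    (PySem.List.pyRange a b 1).flatMap (fun r => pvRow g P r)
      = (List.replicate n (P.map (fun q => g q.1))).flatten := by
  intro n
  induction n with
  | zero =>
    intro a b hn _
    rw [PySem.List.pyRange_one_eq_nil (by omega)]
    simp
  | succ n ih =>
    intro a b hn hb
    rw [PySem.List.pyRange_one_cons (by omega), List.flatMap_cons,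
        ih (a + 1) b (by omega) hb, List.replicate_succ, List.flatten_cons]
    congr 1
    unfold pvRow
    rw [List.filter_eq_self.mpr]
    intro q hq
    exact decide_eq_true (by have := hb q hq; omega)

theorem pvAltGo_eq (toks : List String) (K : Int) :
    ∀ (fuel : Nat) (rounds_done : Int) (P : List (Int × Int)),
      (∀ q ∈ P, rounds_done < q.2) → (∀ q ∈ P, q.2 ≤ K) → P.length ≤ fuel →
    pvAltGo toks fuel rounds_done P =
      ((PySem.List.pyRange rounds_done K 1).flatMap (fun r => pvRow (fun d => d) P r),
       (PySem.List.pyRange rounds_done K 1).flatMap (fun r => pvRow (fun d => PySem.List.pyGetD toks d "") P r)) := by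
  intro fuel
  induction fuel with
  | zero =>
    intro rounds_done P _ _ hf
    have hP : P = [] := List.eq_nil_of_length_eq_zero (by omega)
    subst hP
    simp [pvAltGo, pvRow]
  | succ fuel ih =>
    intro rounds_done P h1 h2 hf
    cases P with
    | nil => simp [pvAltGo, pvRow]
    | cons p t =>
      simp only [pvAltGo]
      set level := t.foldl (fun m q => min m q.2) p.2 with hlevel
      have hmin : PySem.List.min? ((p :: t).map (fun q => q.2)) (fun y => y) = some level := by
        rw [List.map_cons, PySem.List.min?_id_cons]
        congr 1
        rw [List.foldl_map]
      have hle : ∀ q ∈ p :: t, level ≤ q.2 := by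
        intro q hq
        have := PySem.List.min?_isMin hmin q.2 (List.mem_map_of_mem hq)
        simpa using this
      have hattain : level ∈ (p :: t).map (fun q => q.2) := PySem.List.min?_mem hmin
      have hdl : rounds_done < level := by
        obtain ⟨q, hq, hqe⟩ := List.mem_map.mp hattain
        have := h1 q hq
        omega
      have hlK : level ≤ K := by
        obtain ⟨q, hq, hqe⟩ := List.mem_map.mp hattain
        have := h2 q hq
        omega
      have hrec := ih level ((p :: t).filter (fun q => decide (level < q.2)))
        (fun q hq => of_decide_eq_true (List.mem_filter.mp hq).2)
        (fun q hq => h2 q (List.mem_filter.mp hq).1)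
        (by
          have hlt : ((p :: t).filter (fun q => decide (level < q.2))).length < (p :: t).length := by
            refine List.length_filter_lt_length_iff_exists.mpr ?_
            obtain ⟨q, hq, hqe⟩ := List.mem_map.mp hattain
            exact ⟨q, hq, by simp [hqe]⟩
          simp only [List.length_cons] at hlt hf
          omega)
      rw [hrec]
      rw [PySem.List.pyRange_one_append rounds_done level K (by omega) hlK,
          List.flatMap_append, List.flatMap_append]
      have hseg1 : ∀ {α : Type} (g : Int → α),
          (PySem.List.pyRange rounds_done level 1).flatMap (fun r => pvRow g (p :: t) r)
            = (List.replicate ((level - rounds_done).toNat) ((p :: t).map (fun q => g q.1))).flatten :=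
        fun g => pvRow_const_block g (p :: t) _ rounds_done level rfl hle
      have hseg2 : ∀ {α : Type} (g : Int → α),
          (PySem.List.pyRange level K 1).flatMap
              (fun r => pvRow g ((p :: t).filter (fun q => decide (level < q.2))) r)
            = (PySem.List.pyRange level K 1).flatMap (fun r => pvRow g (p :: t) r) := by
        intro α g
        rw [List.flatMap_def, List.flatMap_def]
        congr 1
        refine List.map_congr_left ?_
        intro r hr
        exact pvRow_filter g (p :: t) level r (PySem.List.mem_pyRange_one.mp hr).1
      rw [hseg1, hseg1, hseg2, hseg2]

theorem pvA_inner (toks : List String) (counts : List Int) (P : List (Int × Int))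
    (henum : ∀ p ∈ P, PySem.List.pyGetD counts p.1 0 = p.2) (r : Int) :
    ∀ (acc : List Int × List String),
    (P.map (fun p => p.1)).foldl
      (fun acc device_index =>
        if PySem.List.pyGetD counts device_index 0 ≤ r then acc
        else (acc.1 ++ [device_index], acc.2 ++ [PySem.List.pyGetD toks device_index ""])) acc
    = (acc.1 ++ pvRow (fun d => d) P r, acc.2 ++ pvRow (fun d => PySem.List.pyGetD toks d "") P r) := by
  induction P with
  | nil => intro acc; simp [pvRow]
  | cons a t ih =>
    intro acc
    have ha : PySem.List.pyGetD counts a.1 0 = a.2 := henum a (by simp)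
    have iht := ih (fun p hp => henum p (by simp [hp]))
    simp only [List.map_cons, List.foldl_cons, ha]
    by_cases h : a.2 ≤ r
    · have h' : ¬ r < a.2 := by omega
      rw [if_pos h, iht]
      simp [pvRow, h']
    · have h' : r < a.2 := by omega
      rw [if_neg h, iht]
      simp [pvRow, h']

theorem pvA_outer (toks : List String) (counts : List Int) (P : List (Int × Int))
    (henum : ∀ p ∈ P, PySem.List.pyGetD counts p.1 0 = p.2) :
    ∀ (rl : List Int) (acc : List Int × List String),
    rl.foldl
      (fun acc r =>
        (P.map (fun p => p.1)).foldl
          (fun acc device_index =>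
            if PySem.List.pyGetD counts device_index 0 ≤ r then acc
            else (acc.1 ++ [device_index], acc.2 ++ [PySem.List.pyGetD toks device_index ""])) acc) acc
    = (acc.1 ++ rl.flatMap (fun r => pvRow (fun d => d) P r),
       acc.2 ++ rl.flatMap (fun r => pvRow (fun d => PySem.List.pyGetD toks d "") P r)) := by
  intro rl
  induction rl with
  | nil => intro acc; simp
  | cons r rl ih =>
    intro acc
    rw [List.foldl_cons, pvA_inner toks counts P henum r acc, ih]
    simp

-- ===== VERDICT (by name: the statement is the Claim_ definition above) =====
theorem pvMem_counts {counts : List Int} {p : Int × Int}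
    (hp : p ∈ (PySem.List.enumerate counts).filter (fun p => decide (0 < p.2))) :
    p.2 ∈ counts := by
  have hp' := (List.mem_filter.mp hp).1
  obtain ⟨k, hk, rfl⟩ := (PySem.List.mem_enumerate_iff _ _ _).mp hp'
  exact List.getElem_mem hk

theorem pvHenum {counts : List Int} :
    ∀ p ∈ (PySem.List.enumerate counts).filter (fun p => decide (0 < p.2)),
      PySem.List.pyGetD counts p.1 0 = p.2 := by
  intro p hp
  have hp' := (List.mem_filter.mp hp).1
  obtain ⟨k, hk, rfl⟩ := (PySem.List.mem_enumerate_iff _ _ _).mp hp'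
  simp [PySem.List.pyGetD_natCast, List.getD_eq_getElem?_getD, List.getElem?_eq_getElem hk]

theorem expand_gpu_assignments_py_spec : Claim_equal_expand_gpu_assignments_py := by
  intro toks counts _hdom _hpre
  unfold Spec_expand_gpu_assignments_py expand_gpu_assignments_py expand_gpu_assignments_py_alt
  cases counts with
  | nil => rfl
  | cons c0 crest =>
    simp only []
    set counts := c0 :: crest with hcounts
    set P := (PySem.List.enumerate counts).filter (fun p => decide (0 < p.2)) with hPdef
    have hmax : (PySem.List.max? (if counts = [] then ([0] : List Int) else counts) (fun x => x)).getD 0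
        = crest.foldl max c0 := by
      rw [if_neg (by simp [hcounts]), hcounts, PySem.List.max?_id_cons]
      rfl
    set m : Int := crest.foldl max c0 with hm
    have hpos : ∀ p ∈ P, 0 < p.2 := by
      intro p hp
      exact of_decide_eq_true (List.mem_filter.mp hp).2
    have hbd : ∀ p ∈ P, p.2 ≤ m := by
      intro p hp
      have := PySem.List.max?_isMax (PySem.List.max?_id_cons c0 crest) p.2 (pvMem_counts hp)
      simpa using this
    rw [hmax]
    rw [pvA_outer toks counts P pvHenum (PySem.List.pyRange 0 m 1) ([], [])]
    rw [pvAltGo_eq toks m P.length 0 P hpos hbd (le_refl _)]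
    simp
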